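-- pv_equiv track=rewrite | github.com/wes-novack/adventofcode | 2018/day2/puzzle1.py | check_duplicate_chars
-- ===== SOURCE A (Python) =====
-- def check_duplicate_chars(string):
--     character_dict = {}
--     for letter in string:
--         if letter in character_dict:
--             character_dict[letter] += 1
--         else:
--             character_dict[letter] = 1
--     duplicate_letter_nums = set()
--     for k, v in character_dict.items():
--         if v != 1:
--             duplicate_letter_nums.add(v)
--     return duplicate_letter_nums
-- ===== SOURCE B (Python) =====
-- def check_duplicate_chars(string):
--     if not string:
--         return set()
--     first = string[0]
--     count = string.count(first)
--     rest = string.replace(first, '')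
--     result = {count} if count > 1 else set()
--     return result | check_duplicate_chars(rest)
-- ===== Notes on version B (the rewrite author's own statement) =====
-- stated objective: alternative
-- what changed: Replaces the frequency-dict build plus second filtering pass with a recursion that peels off the first character, counts its occurrences, strips all of them with replace, and unions the result with the recursive answer on the shrunken string.
import Mathlib
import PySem

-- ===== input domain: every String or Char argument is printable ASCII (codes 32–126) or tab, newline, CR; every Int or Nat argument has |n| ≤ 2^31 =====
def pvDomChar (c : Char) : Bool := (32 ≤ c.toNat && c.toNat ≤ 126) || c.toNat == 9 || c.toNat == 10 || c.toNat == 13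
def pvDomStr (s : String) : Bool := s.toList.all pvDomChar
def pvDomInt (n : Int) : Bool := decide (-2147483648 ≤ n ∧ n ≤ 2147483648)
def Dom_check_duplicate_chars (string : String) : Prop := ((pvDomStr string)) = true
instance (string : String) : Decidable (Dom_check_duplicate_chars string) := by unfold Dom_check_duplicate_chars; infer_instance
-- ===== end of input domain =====

-- B replaces A's build-a-frequency-dict-then-filter two-pass with a recursion that peels off
-- the first character, counts it, strips all its occurrences, and unions with the recursive
-- answer on the shrunken string (alternative decomposition; same set of repeated counts).


-- ===== PORT A =====
def check_duplicate_chars (string : String) : List Int :=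
  let character_dict : PySem.Dict Char Int :=
    string.toList.foldl
      (fun d letter =>
        if d.contains letter then d.insert letter (d.getD letter 0 + 1)
        else d.insert letter 1)
      PySem.Dict.empty
  character_dict.items.foldl
    (fun duplicate_letter_nums kv =>
      if kv.2 ≠ 1 then PySem.Set.add duplicate_letter_nums kv.2 else duplicate_letter_nums)
    PySem.Set.empty

-- ===== PORT B =====
-- string.replace(first, '') with a single-character needle removes every occurrence of that
-- character: exact as List.filter on the characters.
def check_duplicate_chars_go : List Char → List Int
  | [] => PySem.Set.empty
  | first :: t =>
    let count : Int := (PySem.List.count (first :: t) first : Int)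
    let rest : List Char := (first :: t).filter (fun x => !(x == first))
    let result : PySem.Set Int :=
      if count > 1 then PySem.Set.add PySem.Set.empty count else PySem.Set.empty
    PySem.Set.union result (check_duplicate_chars_go rest)
termination_by l => l.length
decreasing_by
  simp only [List.filter_cons, beq_self_eq_true, Bool.not_true, if_neg, Bool.false_eq_true,
    not_false_eq_true, List.length_cons]
  exact Nat.lt_succ_of_le (List.length_filter_le _ t)

def check_duplicate_chars_alt (string : String) : List Int :=
  check_duplicate_chars_go string.toList

-- ===== PRECONDITION & SPEC =====
def Spec_check_duplicate_chars (string : String) (out : List Int) : Prop := out = check_duplicate_chars_alt string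
instance (string : String) (out : List Int) : Decidable (Spec_check_duplicate_chars string out) := by unfold Spec_check_duplicate_chars; infer_instance

-- ===== CLAIM (what is proved, stated in full; the proofs are below) =====
def Claim_equal_check_duplicate_chars : Prop := ∀ (string : String), Dom_check_duplicate_chars string → Spec_check_duplicate_chars string (check_duplicate_chars string)

-- ===== LEMMAS AND PROOFS =====

-- A's guarded "if seen then +=1 else =1" update is the Counter update.
theorem build_eq_counter (xs : List Char) :
    xs.foldl
      (fun d letter =>
        if d.contains letter then d.insert letter (d.getD letter 0 + 1)
        else d.insert letter 1)
      PySem.Dict.empty = PySem.Dict.counter xs := by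
  rw [← PySem.Dict.foldl_insert_getD_add_one_eq_counter]
  apply PySem.List.foldl_congr_mem
  intro d c _
  by_cases h : d.contains c
  · simp [h]
  · have hget : List.find? (fun p => p.1 == c) d.items = none := by
      rw [List.find?_eq_none]
      intro p hp hbeq
      simp only [PySem.Dict.contains] at h
      exact h (List.any_eq_true.mpr ⟨p, hp, hbeq⟩)
    simp [h, PySem.Dict.getD, PySem.Dict.get?, hget]

-- filtering out an element already in the accumulating set does not change a fold of Set.add
theorem foldl_add_filter {α : Type} [BEq α] [LawfulBEq α] (c : α) :
    ∀ (xs : List α) (s : PySem.Set α), c ∈ s →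
      List.foldl PySem.Set.add s (xs.filter (fun x => !(x == c))) = List.foldl PySem.Set.add s xs
  | [], _, _ => rfl
  | x :: xs, s, hc => by
    by_cases hx : x = c
    · subst hx
      simp only [List.filter_cons, beq_self_eq_true, Bool.not_true, if_neg, Bool.false_eq_true,
        not_false_eq_true, List.foldl_cons]
      have hadd : PySem.Set.add s x = s := by simp [PySem.Set.add, hc]
      rw [foldl_add_filter x xs s hc, hadd]
    · have hbeq : (!(x == c)) = true := by simp [hx]
      simp only [List.filter_cons, hbeq, if_pos, List.foldl_cons]
      exact foldl_add_filter c xs (PySem.Set.add s x) ((PySem.Set.mem_add s x c).mpr (Or.inl hc))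

-- an element at the head of the accumulator stays at the head while elements ≠ it are added
theorem foldl_add_cons_notmem {α : Type} [BEq α] [LawfulBEq α] (c : α) :
    ∀ (xs : List α) (s : PySem.Set α), c ∉ xs →
      List.foldl PySem.Set.add (c :: s) xs = c :: List.foldl PySem.Set.add s xs
  | [], _, _ => rfl
  | x :: xs, s, h => by
    have hx : x ≠ c := fun he => h (he ▸ List.mem_cons_self)
    have h' : c ∉ xs := fun hm => h (List.mem_cons_of_mem _ hm)
    simp only [List.foldl_cons]
    have : PySem.Set.add (c :: s) x = c :: PySem.Set.add s x := by
      by_cases hm : x ∈ s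
      · have h1 : PySem.Set.add (c :: s) x = c :: s := by
          simp [PySem.Set.add, List.mem_cons, hm]
        have h2 : PySem.Set.add s x = s := by simp [PySem.Set.add, hm]
        rw [h1, h2]
      · have h1 : PySem.Set.add (c :: s) x = (c :: s) ++ [x] := by
          simp [PySem.Set.add, List.mem_cons, hm, hx]
        have h2 : PySem.Set.add s x = s ++ [x] := by simp [PySem.Set.add, hm]
        rw [h1, h2]; rfl
    rw [this, foldl_add_cons_notmem c xs (PySem.Set.add s x) h']

-- set(c::t) keeps c first, then set of t with all copies of c removed
theorem ofList_cons_filter {α : Type} [BEq α] [LawfulBEq α] (c : α) (t : List α) :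
    PySem.Set.ofList (c :: t) = c :: PySem.Set.ofList (t.filter (fun x => !(x == c))) := by
  have h0 : PySem.Set.ofList (c :: t) = List.foldl PySem.Set.add [c] t := rfl
  rw [h0, ← foldl_add_filter c t [c] List.mem_cons_self]
  have hno : c ∉ t.filter (fun x => !(x == c)) := by
    intro hm
    have := List.of_mem_filter hm
    simp at this
  rw [foldl_add_cons_notmem c _ [] hno]
  rfl

-- folding Set.add over set(b) is folding it over b (later duplicates are no-ops)
theorem foldl_add_ofList {α : Type} [BEq α] [LawfulBEq α] :
    ∀ (b : List α) (s : PySem.Set α),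
      List.foldl PySem.Set.add s (PySem.Set.ofList b) = List.foldl PySem.Set.add s b
  | [], _ => rfl
  | x :: b, s => by
    rw [ofList_cons_filter, List.foldl_cons, List.foldl_cons,
      foldl_add_ofList (b.filter (fun y => !(y == x))) (PySem.Set.add s x),
      foldl_add_filter x b (PySem.Set.add s x) ((PySem.Set.mem_add s x x).mpr (Or.inr rfl))]
termination_by b => b.length
decreasing_by
  exact Nat.lt_succ_of_le (List.length_filter_le _ b)

-- a guarded add-fold is an add-fold over the filtered, mapped value list
theorem foldl_addif (f : Char → Int) (p : Char → Prop) [DecidablePred p] :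
    ∀ (ds : List Char) (acc : PySem.Set Int),
      ds.foldl (fun a c => if p c then PySem.Set.add a (f c) else a) acc
        = List.foldl PySem.Set.add acc ((ds.filter (fun c => decide (p c))).map f)
  | [], _ => rfl
  | d :: ds, acc => by
    by_cases hd : p d
    · simp only [List.foldl_cons, if_pos hd, List.filter_cons, decide_eq_true hd]
      exact foldl_addif f p ds (PySem.Set.add acc (f d))
    · simp only [List.foldl_cons, if_neg hd, List.filter_cons, decide_eq_false hd, Bool.false_eq_true,
        if_neg, not_false_eq_true]
      exact foldl_addif f p ds acc

-- the canonical value both programs compute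
def dupCounts (l : List Char) : List Int :=
  PySem.Set.ofList
    (((PySem.Set.ofList l).filter (fun c => decide ((List.count c l : Int) ≠ 1))).map
      (fun c => (List.count c l : Int)))

theorem A_eq_dupCounts (s : String) : check_duplicate_chars s = dupCounts s.toList := by
  unfold check_duplicate_chars dupCounts
  rw [build_eq_counter]
  simp only [PySem.Dict.items_counter, List.foldl_map]
  rw [foldl_addif (fun c => (List.count c s.toList : Int)) (fun c => ((List.count c s.toList : Int) ≠ 1))
    (PySem.Set.ofList s.toList) PySem.Set.empty]
  rfl

theorem go_eq_dupCounts : ∀ (l : List Char), check_duplicate_chars_go l = dupCounts l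
  | [] => by rw [check_duplicate_chars_go]; rfl
  | c :: t => by
    rw [check_duplicate_chars_go]
    have hrest : (c :: t).filter (fun x => !(x == c)) = t.filter (fun x => !(x == c)) := by simp
    set rest := t.filter (fun x => !(x == c)) with hrestdef
    rw [hrest, go_eq_dupCounts rest]
    -- counts agree between l = c :: t and rest for every d ≠ c
    have hcount : ∀ d ∈ PySem.Set.ofList rest,
        (List.count d (c :: t) : Int) = (List.count d rest : Int) := by
      intro d hd
      have hdr : d ∈ rest := (PySem.Set.mem_ofList _ _).mp hd
      have hdne : d ≠ c := by
        have := List.of_mem_filter hdr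
        simp at this; exact this
      have h1 : List.count d (c :: t) = List.count d t := by
        have hcd : ¬ c = d := fun h => hdne h.symm
        simp [hcd]
      have h2 : List.count d rest = List.count d t := by
        rw [hrestdef]
        exact List.count_filter (by simp [hdne])
      rw [h1, h2]
    have hn1 : 1 ≤ List.count c (c :: t) := List.one_le_count_iff.mpr List.mem_cons_self
    -- dupCounts (c :: t) unfolds to an optional head n followed by dupCounts rest
    have hvs : ((PySem.Set.ofList (c :: t)).filter
          (fun d => decide ((List.count d (c :: t) : Int) ≠ 1))).map
          (fun d => (List.count d (c :: t) : Int))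
        = (if (List.count c (c :: t) : Int) > 1 then [(List.count c (c :: t) : Int)] else [])
          ++ ((PySem.Set.ofList rest).filter (fun d => decide ((List.count d rest : Int) ≠ 1))).map
              (fun d => (List.count d rest : Int)) := by
      rw [ofList_cons_filter c t, ← hrestdef]
      rw [List.filter_cons]
      have hfilter : (PySem.Set.ofList rest).filter
            (fun d => decide ((List.count d (c :: t) : Int) ≠ 1))
          = (PySem.Set.ofList rest).filter (fun d => decide ((List.count d rest : Int) ≠ 1)) := by
        apply List.filter_congr
        intro d hd
        rw [hcount d hd]
      by_cases hc1 : (List.count c (c :: t) : Int) ≠ 1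
      · have hgt : (List.count c (c :: t) : Int) > 1 := by
          have : (1 : Int) ≤ (List.count c (c :: t) : Int) := by exact_mod_cast hn1
          omega
        simp only [decide_eq_true hc1, if_pos, hgt, List.map_cons, hfilter, List.cons_append,
          List.nil_append]
        congr 1
        apply List.map_congr_left
        intro d hd
        exact hcount d (List.mem_of_mem_filter hd)
      · have hngt : ¬ ((List.count c (c :: t) : Int) > 1) := by omega
        simp only [decide_eq_false hc1, Bool.false_eq_true, if_neg, not_false_eq_true, hfilter,
          hngt, List.nil_append]
        apply List.map_congr_left
        intro d hd
        exact hcount d (List.mem_of_mem_filter hd)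
    show PySem.Set.union _ _ = dupCounts (c :: t)
    unfold dupCounts
    rw [hvs]
    by_cases hgt : (List.count c (c :: t) : Int) > 1
    · have hres : (if ((PySem.List.count (c :: t) c : Nat) : Int) > 1
            then PySem.Set.add PySem.Set.empty ((PySem.List.count (c :: t) c : Nat) : Int)
            else PySem.Set.empty)
          = [(List.count c (c :: t) : Int)] := by
        rw [PySem.List.count_eq]
        rw [if_pos hgt]
        rfl
      rw [hres, if_pos hgt]
      show List.foldl PySem.Set.add [(List.count c (c :: t) : Int)] (dupCounts rest) = _
      unfold dupCounts
      rw [foldl_add_ofList]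
      rfl
    · have hres : (if ((PySem.List.count (c :: t) c : Nat) : Int) > 1
            then PySem.Set.add PySem.Set.empty ((PySem.List.count (c :: t) c : Nat) : Int)
            else PySem.Set.empty)
          = ([] : List Int) := by
        rw [PySem.List.count_eq]
        rw [if_neg hgt]
        rfl
      rw [hres, if_neg hgt]
      show List.foldl PySem.Set.add [] (dupCounts rest) = _
      unfold dupCounts
      rw [foldl_add_ofList]
      rfl
termination_by l => l.length
decreasing_by
  exact Nat.lt_succ_of_le (List.length_filter_le _ t)

-- ===== VERDICT (by name: the statement is the Claim_ definition above) =====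
theorem check_duplicate_chars_spec : Claim_equal_check_duplicate_chars := by
  intro s _
  unfold Spec_check_duplicate_chars check_duplicate_chars_alt
  rw [A_eq_dupCounts, go_eq_dupCounts]
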